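-- pv_equiv track=rewrite | github.com/algowizzzz/ccr_calculators | gap_analysis_universal_vs_complete.py | categorize_metrics
-- ===== SOURCE A (Python) =====
-- def categorize_metrics(metrics_dict):
--     """Categorize metrics by business function"""
--     categories = {
--         'Capital & Risk': [],
--         'Assets & Liabilities': [],
--         'Revenue & Income': [],
--         'Regulatory & Compliance': [],
--         'Operations & Efficiency': [],
--         'Market & Trading': [],
--         'Credit & Loans': [],
--         'Other': []
--     }
--
--     for metric_name in metrics_dict.keys():
--         name_lower = metric_name.lower()
--
--         if any(term in name_lower for term in ['capital', 'tier', 'ratio', 'risk', 'leverage', 'adequacy']):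
--             categories['Capital & Risk'].append(metric_name)
--         elif any(term in name_lower for term in ['asset', 'liabilit', 'deposit', 'cash', 'securities', 'investment']):
--             categories['Assets & Liabilities'].append(metric_name)
--         elif any(term in name_lower for term in ['revenue', 'income', 'interest', 'fee', 'earnings', 'profit']):
--             categories['Revenue & Income'].append(metric_name)
--         elif any(term in name_lower for term in ['regulatory', 'compliance', 'allowance', 'provision', 'reserve']):
--             categories['Regulatory & Compliance'].append(metric_name)
--         elif any(term in name_lower for term in ['expense', 'cost', 'efficiency', 'employee', 'operating']):
--             categories['Operations & Efficiency'].append(metric_name)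
--         elif any(term in name_lower for term in ['trading', 'market', 'derivative', 'fair', 'unrealized']):
--             categories['Market & Trading'].append(metric_name)
--         elif any(term in name_lower for term in ['loan', 'credit', 'mortgage', 'financing', 'receivable']):
--             categories['Credit & Loans'].append(metric_name)
--         else:
--             categories['Other'].append(metric_name)
--
--     return categories
-- ===== SOURCE B (Python) =====
-- # B: category-outer sieve — instead of classifying each metric through the
-- # cascade, walk the categories in priority order and at each stage partition
-- # the still-unassigned metrics into that category's bucket and the remainder;
-- # whatever survives all seven stages is 'Other'.
-- _TABLE = [
--     ('Capital & Risk', ['capital', 'tier', 'ratio', 'risk', 'leverage', 'adequacy']),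
--     ('Assets & Liabilities', ['asset', 'liabilit', 'deposit', 'cash', 'securities', 'investment']),
--     ('Revenue & Income', ['revenue', 'income', 'interest', 'fee', 'earnings', 'profit']),
--     ('Regulatory & Compliance', ['regulatory', 'compliance', 'allowance', 'provision', 'reserve']),
--     ('Operations & Efficiency', ['expense', 'cost', 'efficiency', 'employee', 'operating']),
--     ('Market & Trading', ['trading', 'market', 'derivative', 'fair', 'unrealized']),
--     ('Credit & Loans', ['loan', 'credit', 'mortgage', 'financing', 'receivable']),
-- ]
--
-- def _partition(remaining, keywords):
--     hit, miss = [], []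
--     for name, low in remaining:
--         (hit if any(k in low for k in keywords) else miss).append((name, low))
--     return hit, miss
--
-- def categorize_metrics(metrics_dict):
--     remaining = [(m, m.lower()) for m in metrics_dict]
--     result = {}
--     for category, keywords in _TABLE:
--         hit, remaining = _partition(remaining, keywords)
--         result[category] = [name for name, _ in hit]
--     result['Other'] = [name for name, _ in remaining]
--     return result
-- ===== Notes on version B (the rewrite author's own statement) =====
-- stated objective: alternative
-- what changed: Inverts the loop nesting: instead of classifying each metric through a per-metric if/elif cascade into a pre-built dict, B walks the categories in priority order and at each stage partitions the still-unassigned metrics into that category's bucket and a shrinking remainder, with the survivors of all seven stages becoming 'Other'.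
import Mathlib
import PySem

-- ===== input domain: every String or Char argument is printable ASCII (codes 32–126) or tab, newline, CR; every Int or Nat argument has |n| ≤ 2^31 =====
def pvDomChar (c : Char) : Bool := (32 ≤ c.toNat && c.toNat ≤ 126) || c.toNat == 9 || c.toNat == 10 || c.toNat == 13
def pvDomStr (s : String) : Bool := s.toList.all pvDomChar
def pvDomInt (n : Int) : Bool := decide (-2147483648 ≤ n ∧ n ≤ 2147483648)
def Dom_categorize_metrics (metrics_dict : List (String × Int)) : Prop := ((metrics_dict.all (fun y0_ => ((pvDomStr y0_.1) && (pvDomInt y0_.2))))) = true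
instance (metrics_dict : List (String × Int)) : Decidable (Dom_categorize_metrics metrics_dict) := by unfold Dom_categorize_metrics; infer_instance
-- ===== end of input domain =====

-- A = per-metric if/elif cascade appending into a pre-built dict; B is a category-outer
-- sieve: each category in priority order partitions the remaining metrics, leftovers = Other.


-- ===== PORT A =====
-- literal port of A's loop body: the if/elif cascade appending into the dict
def pvStepA (cats : PySem.Dict String (List String)) (metric_name : String) : PySem.Dict String (List String) :=
  let name_lower := PySem.Str.lower metric_name
  if (["capital", "tier", "ratio", "risk", "leverage", "adequacy"].any (fun term => PySem.Str.isIn term name_lower)) then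
    cats.modify "Capital & Risk" [] (fun l => l ++ [metric_name])
  else if (["asset", "liabilit", "deposit", "cash", "securities", "investment"].any (fun term => PySem.Str.isIn term name_lower)) then
    cats.modify "Assets & Liabilities" [] (fun l => l ++ [metric_name])
  else if (["revenue", "income", "interest", "fee", "earnings", "profit"].any (fun term => PySem.Str.isIn term name_lower)) then
    cats.modify "Revenue & Income" [] (fun l => l ++ [metric_name])
  else if (["regulatory", "compliance", "allowance", "provision", "reserve"].any (fun term => PySem.Str.isIn term name_lower)) then
    cats.modify "Regulatory & Compliance" [] (fun l => l ++ [metric_name])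
  else if (["expense", "cost", "efficiency", "employee", "operating"].any (fun term => PySem.Str.isIn term name_lower)) then
    cats.modify "Operations & Efficiency" [] (fun l => l ++ [metric_name])
  else if (["trading", "market", "derivative", "fair", "unrealized"].any (fun term => PySem.Str.isIn term name_lower)) then
    cats.modify "Market & Trading" [] (fun l => l ++ [metric_name])
  else if (["loan", "credit", "mortgage", "financing", "receivable"].any (fun term => PySem.Str.isIn term name_lower)) then
    cats.modify "Credit & Loans" [] (fun l => l ++ [metric_name])
  else
    cats.modify "Other" [] (fun l => l ++ [metric_name])

def categorize_metrics (metrics_dict : List (String × Int)) : List (String × List String) :=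
  let categories : PySem.Dict String (List String) :=
    PySem.Dict.ofList [("Capital & Risk", []), ("Assets & Liabilities", []), ("Revenue & Income", []),
      ("Regulatory & Compliance", []), ("Operations & Efficiency", []), ("Market & Trading", []),
      ("Credit & Loans", []), ("Other", [])]
  ((PySem.Dict.ofList metrics_dict).keys.foldl pvStepA categories).items

-- ===== PORT B =====
-- Source B's _TABLE
def pvTable : List (String × List String) :=
  [("Capital & Risk", ["capital", "tier", "ratio", "risk", "leverage", "adequacy"]),
   ("Assets & Liabilities", ["asset", "liabilit", "deposit", "cash", "securities", "investment"]),
   ("Revenue & Income", ["revenue", "income", "interest", "fee", "earnings", "profit"]),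
   ("Regulatory & Compliance", ["regulatory", "compliance", "allowance", "provision", "reserve"]),
   ("Operations & Efficiency", ["expense", "cost", "efficiency", "employee", "operating"]),
   ("Market & Trading", ["trading", "market", "derivative", "fair", "unrealized"]),
   ("Credit & Loans", ["loan", "credit", "mortgage", "financing", "receivable"])]

-- Source B's _partition: one pass appending each (name, low) to hit or miss
def pvPartition (remaining : List (String × String)) (keywords : List String) :
    List (String × String) × List (String × String) :=
  remaining.foldl
    (fun p ml => if keywords.any (fun k => PySem.Str.isIn k ml.2) then (p.1 ++ [ml], p.2) else (p.1, p.2 ++ [ml]))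
    ([], [])

-- Source B's loop body: take this category's bucket out of the remaining metrics
def pvSieveStep (st : List (String × List String) × List (String × String)) (row : String × List String) :
    List (String × List String) × List (String × String) :=
  let p := pvPartition st.2 row.2
  (st.1 ++ [(row.1, p.1.map Prod.fst)], p.2)

def categorize_metrics_alt (metrics_dict : List (String × Int)) : List (String × List String) :=
  let remaining := (PySem.Dict.ofList metrics_dict).keys.map (fun m => (m, PySem.Str.lower m))
  let st := pvTable.foldl pvSieveStep ([], remaining)
  st.1 ++ [("Other", st.2.map Prod.fst)]

-- ===== PRECONDITION & SPEC =====
def Spec_categorize_metrics (metrics_dict : List (String × Int)) (out : List (String × List String)) : Prop := out = categorize_metrics_alt metrics_dict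
instance (metrics_dict : List (String × Int)) (out : List (String × List String)) : Decidable (Spec_categorize_metrics metrics_dict out) := by unfold Spec_categorize_metrics; infer_instance

-- ===== CLAIM (what is proved, stated in full; the proofs are below) =====
def Claim_equal_categorize_metrics : Prop := ∀ (metrics_dict : List (String × Int)), Dom_categorize_metrics metrics_dict → Spec_categorize_metrics metrics_dict (categorize_metrics metrics_dict)

-- ===== LEMMAS AND PROOFS =====

-- proof helper: the first table row (within `rows`) whose keyword matches `low`
def pvCatOf (rows : List (String × List String)) (low : String) : Option String :=
  (rows.find? (fun row => row.2.any (fun k => PySem.Str.isIn k low))).map Prod.fst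

-- proof helper: the category A's cascade assigns to a metric name
def pvCategory (name : String) : String :=
  (pvCatOf pvTable (PySem.Str.lower name)).getD "Other"

-- A's cascade step IS "append under the label pvCategory computes"
lemma pvStepA_eq (d : PySem.Dict String (List String)) (m : String) :
    pvStepA d m = d.modify (pvCategory m) [] (fun l => l ++ [m]) := by
  rcases Bool.eq_false_or_eq_true (["capital", "tier", "ratio", "risk", "leverage", "adequacy"].any (fun term => PySem.Str.isIn term (PySem.Str.lower m))) with h1 | h1 <;>
  rcases Bool.eq_false_or_eq_true (["asset", "liabilit", "deposit", "cash", "securities", "investment"].any (fun term => PySem.Str.isIn term (PySem.Str.lower m))) with h2 | h2 <;>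
  rcases Bool.eq_false_or_eq_true (["revenue", "income", "interest", "fee", "earnings", "profit"].any (fun term => PySem.Str.isIn term (PySem.Str.lower m))) with h3 | h3 <;>
  rcases Bool.eq_false_or_eq_true (["regulatory", "compliance", "allowance", "provision", "reserve"].any (fun term => PySem.Str.isIn term (PySem.Str.lower m))) with h4 | h4 <;>
  rcases Bool.eq_false_or_eq_true (["expense", "cost", "efficiency", "employee", "operating"].any (fun term => PySem.Str.isIn term (PySem.Str.lower m))) with h5 | h5 <;>
  rcases Bool.eq_false_or_eq_true (["trading", "market", "derivative", "fair", "unrealized"].any (fun term => PySem.Str.isIn term (PySem.Str.lower m))) with h6 | h6 <;>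
  rcases Bool.eq_false_or_eq_true (["loan", "credit", "mortgage", "financing", "receivable"].any (fun term => PySem.Str.isIn term (PySem.Str.lower m))) with h7 | h7 <;>
  simp only [pvStepA, pvCategory, pvCatOf, pvTable, List.find?, h1, h2, h3, h4, h5, h6, h7, Option.map_some, Option.map_none, Option.getD_some, Option.getD_none, if_true, if_false, Bool.false_eq_true]

-- the label is always one of the eight keys
lemma pvCategory_mem (m : String) :
    pvCategory m ∈ ["Capital & Risk", "Assets & Liabilities", "Revenue & Income",
      "Regulatory & Compliance", "Operations & Efficiency", "Market & Trading",
      "Credit & Loans", "Other"] := by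
  rcases Bool.eq_false_or_eq_true (["capital", "tier", "ratio", "risk", "leverage", "adequacy"].any (fun term => PySem.Str.isIn term (PySem.Str.lower m))) with h1 | h1 <;>
  rcases Bool.eq_false_or_eq_true (["asset", "liabilit", "deposit", "cash", "securities", "investment"].any (fun term => PySem.Str.isIn term (PySem.Str.lower m))) with h2 | h2 <;>
  rcases Bool.eq_false_or_eq_true (["revenue", "income", "interest", "fee", "earnings", "profit"].any (fun term => PySem.Str.isIn term (PySem.Str.lower m))) with h3 | h3 <;>
  rcases Bool.eq_false_or_eq_true (["regulatory", "compliance", "allowance", "provision", "reserve"].any (fun term => PySem.Str.isIn term (PySem.Str.lower m))) with h4 | h4 <;>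
  rcases Bool.eq_false_or_eq_true (["expense", "cost", "efficiency", "employee", "operating"].any (fun term => PySem.Str.isIn term (PySem.Str.lower m))) with h5 | h5 <;>
  rcases Bool.eq_false_or_eq_true (["trading", "market", "derivative", "fair", "unrealized"].any (fun term => PySem.Str.isIn term (PySem.Str.lower m))) with h6 | h6 <;>
  rcases Bool.eq_false_or_eq_true (["loan", "credit", "mortgage", "financing", "receivable"].any (fun term => PySem.Str.isIn term (PySem.Str.lower m))) with h7 | h7 <;>
  simp only [pvCategory, pvCatOf, pvTable, List.find?, h1, h2, h3, h4, h5, h6, h7, Option.map_some, Option.map_none, Option.getD_some, Option.getD_none] <;> decide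

-- a dict with Nodup keys is its keys paired with their values
lemma items_eq_keys_map (d : PySem.Dict String (List String)) (h : d.keys.Nodup) :
    d.items = d.keys.map (fun k => (k, d.getD k [])) := by
  obtain ⟨l⟩ := d
  induction l with
  | nil => rfl
  | cons p t ih =>
    obtain ⟨k, v⟩ := p
    have h' : (k :: t.map Prod.fst).Nodup := by simpa using h
    have hd : (PySem.Dict.mk ((k, v) :: t)).getD k [] = v := by
      simp [PySem.Dict.getD_eq_get?_getD, PySem.Dict.get?_mk_cons]
    have htl : ∀ x ∈ t.map Prod.fst,
        (PySem.Dict.mk ((k, v) :: t)).getD x [] = (PySem.Dict.mk t).getD x [] := by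
      intro x hx
      have hxk : k ≠ x := fun e => (List.nodup_cons.mp h').1 (e ▸ hx)
      simp [PySem.Dict.getD_eq_get?_getD, PySem.Dict.get?_mk_cons, hxk]
    have ht : (PySem.Dict.mk t).items = (PySem.Dict.mk t).keys.map (fun x => (x, (PySem.Dict.mk t).getD x [])) :=
      ih (by simpa using (List.nodup_cons.mp h').2)
    show ((k, v) :: t : List (String × List String))
        = (PySem.Dict.mk ((k, v) :: t)).keys.map (fun x => (x, (PySem.Dict.mk ((k, v) :: t)).getD x []))
    calc ((k, v) :: t : List (String × List String))
        = (k, (PySem.Dict.mk ((k, v) :: t)).getD k []) :: (PySem.Dict.mk t).items := by rw [hd]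
      _ = (k, (PySem.Dict.mk ((k, v) :: t)).getD k [])
            :: (t.map Prod.fst).map (fun x => (x, (PySem.Dict.mk t).getD x [])) := by
            rw [ht]; simp
      _ = (k, (PySem.Dict.mk ((k, v) :: t)).getD k [])
            :: (t.map Prod.fst).map (fun x => (x, (PySem.Dict.mk ((k, v) :: t)).getD x [])) := by
            congr 1
            exact (List.map_congr_left (fun x hx => by rw [htl x hx])).symm
      _ = _ := by simp

-- the eight keys, in insertion order
def pvNames : List String :=
  ["Capital & Risk", "Assets & Liabilities", "Revenue & Income", "Regulatory & Compliance",
   "Operations & Efficiency", "Market & Trading", "Credit & Loans", "Other"]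

-- the literal initial dict of port A
def pvInit : PySem.Dict String (List String) :=
  PySem.Dict.ofList [("Capital & Risk", []), ("Assets & Liabilities", []), ("Revenue & Income", []),
    ("Regulatory & Compliance", []), ("Operations & Efficiency", []), ("Market & Trading", []),
    ("Credit & Loans", []), ("Other", [])]

lemma pvFinal_keys (ms : List String) :
    (ms.foldl (fun d m => d.modify (pvCategory m) [] (fun l => l ++ [m])) pvInit).keys = pvNames := by
  rw [PySem.Dict.keys_foldl_modify_key ms pvCategory [] (fun _ m l => l ++ [m]) pvInit]
  rw [PySem.Set.update_eq_append_filter]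
  have hkeys : PySem.Dict.keys pvInit = pvNames := by decide
  have hf : (PySem.Set.ofList (ms.map pvCategory)).filter
      (fun y => !(PySem.Set.contains (PySem.Dict.keys pvInit) y)) = [] := by
    rw [List.filter_eq_nil_iff]
    intro y hy
    have hy' : y ∈ ms.map pvCategory := (PySem.Set.mem_ofList _ _).mp hy
    obtain ⟨m, _, rfl⟩ := List.mem_map.mp hy'
    have hmem : pvCategory m ∈ PySem.Dict.keys pvInit := by
      rw [hkeys]; simpa [pvNames] using pvCategory_mem m
    simp [hmem]
  rw [hf, List.append_nil, hkeys]

lemma pvFinal_getD (ms : List String) (c : String) (hc : pvInit.getD c [] = []) :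
    (ms.foldl (fun d m => d.modify (pvCategory m) [] (fun l => l ++ [m])) pvInit).getD c []
      = ms.filter (fun m => pvCategory m == c) := by
  have h1 : ms.foldl (fun d m => d.modify (pvCategory m) [] (fun l => l ++ [m])) pvInit
      = (ms.map (fun m => (pvCategory m, m))).foldl
          (fun d p => d.modify p.1 [] (fun l => l ++ [p.2])) pvInit := by
    rw [List.foldl_map]
  rw [h1, PySem.Dict.getD_foldl_modify_append, hc, List.nil_append, List.filter_map]
  have h2 : ((fun p : String × String => p.1 == c) ∘ fun m => (pvCategory m, m))
      = fun m => pvCategory m == c := rfl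
  rw [h2, List.map_map]
  simp [Function.comp_def]

-- A's characterization: the eight names, each with its filter of the keys
lemma pvA_char (md : List (String × Int)) :
    categorize_metrics md
      = pvNames.map (fun c => (c, (PySem.Dict.ofList md).keys.filter (fun m => pvCategory m == c))) := by
  have hstep : pvStepA = fun d m => d.modify (pvCategory m) [] (fun l => l ++ [m]) :=
    funext fun d => funext fun m => pvStepA_eq d m
  set ms := (PySem.Dict.ofList md).keys with hms
  have hA : categorize_metrics md
      = (ms.foldl (fun d m => d.modify (pvCategory m) [] (fun l => l ++ [m])) pvInit).items := by
    simp only [categorize_metrics, hstep, pvInit, hms]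
  have hnodup : (ms.foldl (fun d m => d.modify (pvCategory m) [] (fun l => l ++ [m])) pvInit).keys.Nodup := by
    rw [pvFinal_keys]; decide
  rw [hA, items_eq_keys_map _ hnodup, pvFinal_keys]
  apply List.map_congr_left
  intro c hc
  have hcinit : pvInit.getD c [] = [] := by
    revert hc
    simp only [pvNames, List.mem_cons, List.not_mem_nil, or_false]
    rintro (rfl | rfl | rfl | rfl | rfl | rfl | rfl | rfl) <;> decide
  rw [pvFinal_getD ms c hcinit]

-- ===== B-side lemmas =====

lemma pvPartition_eq (r : List (String × String)) (kws : List String) :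
    pvPartition r kws
      = (r.filter (fun ml => kws.any (fun k => PySem.Str.isIn k ml.2)),
         r.filter (fun ml => !kws.any (fun k => PySem.Str.isIn k ml.2))) := by
  suffices h : ∀ (a b : List (String × String)),
      r.foldl (fun p ml => if kws.any (fun k => PySem.Str.isIn k ml.2) then (p.1 ++ [ml], p.2) else (p.1, p.2 ++ [ml])) (a, b)
        = (a ++ r.filter (fun ml => kws.any (fun k => PySem.Str.isIn k ml.2)),
           b ++ r.filter (fun ml => !kws.any (fun k => PySem.Str.isIn k ml.2))) by
    simpa [pvPartition] using h [] []
  induction r with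
  | nil => intro a b; simp
  | cons x t ih =>
    intro a b
    by_cases hx : kws.any (fun k => PySem.Str.isIn k x.2) = true
    · have hneg : ¬ ((!kws.any (fun k => PySem.Str.isIn k x.2)) = true) := by
        rw [hx]; exact Bool.false_ne_true
      rw [List.foldl_cons, if_pos hx, ih, List.filter_cons, List.filter_cons, if_pos hx, if_neg hneg]
      simp
    · have hpos : (!kws.any (fun k => PySem.Str.isIn k x.2)) = true := by
        rw [eq_false_of_ne_true hx]; rfl
      rw [List.foldl_cons, if_neg hx, ih, List.filter_cons, List.filter_cons, if_neg hx, if_pos hpos]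
      simp

lemma pvCatOf_cons (row : String × List String) (rest : List (String × List String)) (low : String) :
    pvCatOf (row :: rest) low
      = if row.2.any (fun k => PySem.Str.isIn k low) then some row.1 else pvCatOf rest low := by
  by_cases h : row.2.any (fun k => PySem.Str.isIn k low) = true
  · rw [if_pos h]
    simp only [pvCatOf, List.find?, h, Option.map_some]
  · rw [if_neg h]
    simp only [pvCatOf, List.find?, eq_false_of_ne_true h]

lemma pvCatOf_mem (rows : List (String × List String)) (low : String) (c : String)
    (h : pvCatOf rows low = some c) : c ∈ rows.map Prod.fst := by
  induction rows with
  | nil => simp [pvCatOf] at h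
  | cons row rest ih =>
    rw [pvCatOf_cons] at h
    by_cases hm : row.2.any (fun k => PySem.Str.isIn k low) = true
    · rw [if_pos hm] at h
      rw [List.map_cons, Option.some.inj h]
      exact List.mem_cons_self
    · rw [if_neg hm] at h
      exact List.mem_cons_of_mem _ (ih h)

-- the sieve: folding pvSieveStep over rows produces, per row, the first-match bucket
lemma pvSieve (rows : List (String × List String)) :
    ∀ (acc : List (String × List String)) (r : List (String × String)),
    (rows.map Prod.fst).Nodup →
    rows.foldl pvSieveStep (acc, r)
      = (acc ++ rows.map (fun row =>
            (row.1, (r.filter (fun ml => pvCatOf rows ml.2 == some row.1)).map Prod.fst)),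
         r.filter (fun ml => (pvCatOf rows ml.2).isNone)) := by
  induction rows with
  | nil => intro acc r _; simp [pvCatOf]
  | cons row rest ih =>
    intro acc r hnd
    have hnd' : (rest.map Prod.fst).Nodup := (List.nodup_cons.mp (by simpa using hnd)).2
    have hrow : row.1 ∉ rest.map Prod.fst := (List.nodup_cons.mp (by simpa using hnd)).1
    rw [List.foldl_cons]
    have hstep : pvSieveStep (acc, r) row
        = (acc ++ [(row.1, ((r.filter (fun ml => row.2.any (fun k => PySem.Str.isIn k ml.2))).map Prod.fst))],
           r.filter (fun ml => !row.2.any (fun k => PySem.Str.isIn k ml.2))) := by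
      simp [pvSieveStep, pvPartition_eq]
    rw [hstep, ih _ _ hnd', Prod.mk.injEq]
    refine ⟨?_, ?_⟩
    · -- first components
      rw [List.append_assoc]
      congr 1
      rw [List.map_cons, List.singleton_append]
      congr 1
      · -- head bucket
        congr 2
        apply List.filter_congr
        intro ml _
        rw [pvCatOf_cons]
        by_cases hm : row.2.any (fun k => PySem.Str.isIn k ml.2) = true
        · rw [if_pos hm, hm]; simp
        · rw [if_neg hm, eq_false_of_ne_true hm]
          rcases hcat : pvCatOf rest ml.2 with _ | c
          · simp
          · have hc : c ≠ row.1 := fun e => hrow (e ▸ pvCatOf_mem rest ml.2 c hcat)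
            simp [hc]
      · -- tail buckets
        apply List.map_congr_left
        intro row' hrow'
        rw [List.filter_filter]
        congr 2
        apply List.filter_congr
        intro ml _
        rw [pvCatOf_cons]
        by_cases hm : row.2.any (fun k => PySem.Str.isIn k ml.2) = true
        · have hne : row.1 ≠ row'.1 := fun e => hrow (e ▸ List.mem_map_of_mem hrow')
          rw [if_pos hm, hm]
          simpa using hne
        · rw [if_neg hm, eq_false_of_ne_true hm]
          simp
    · -- remaining
      rw [List.filter_filter]
      apply List.filter_congr
      intro ml _
      rw [pvCatOf_cons]
      by_cases hm : row.2.any (fun k => PySem.Str.isIn k ml.2) = true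
      · rw [if_pos hm, hm]; simp
      · rw [if_neg hm, eq_false_of_ne_true hm]; simp

lemma pvB_char (md : List (String × Int)) :
    categorize_metrics_alt md
      = pvNames.map (fun c => (c, (PySem.Dict.ofList md).keys.filter (fun m => pvCategory m == c))) := by
  set ms := (PySem.Dict.ofList md).keys with hms
  have hnd : (pvTable.map Prod.fst).Nodup := by decide
  have h := pvSieve pvTable [] (ms.map (fun m => (m, PySem.Str.lower m))) hnd
  show (pvTable.foldl pvSieveStep ([], ms.map (fun m => (m, PySem.Str.lower m)))).1
      ++ [("Other", (pvTable.foldl pvSieveStep ([], ms.map (fun m => (m, PySem.Str.lower m)))).2.map Prod.fst)]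
      = _
  rw [h]
  simp only [List.nil_append]
  have hNames : pvNames = pvTable.map Prod.fst ++ ["Other"] := by decide
  rw [hNames, List.map_append]
  congr 1
  · -- table buckets
    rw [List.map_map]
    apply List.map_congr_left
    intro row hrowmem
    have hrow1 : row.1 ∈ pvTable.map Prod.fst := List.mem_map_of_mem hrowmem
    have hOther : row.1 ≠ "Other" := by
      have hn : "Other" ∉ pvTable.map Prod.fst := by decide
      exact fun e => hn (e ▸ hrow1)
    simp only [Function.comp_def]
    congr 1
    rw [List.filter_map, List.map_map]
    have : ((fun ml : String × String => pvCatOf pvTable ml.2 == some row.1) ∘ fun m => (m, PySem.Str.lower m))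
        = fun m => pvCatOf pvTable (PySem.Str.lower m) == some row.1 := rfl
    rw [this]
    simp only [Function.comp_def, List.map_id']
    apply List.filter_congr
    intro m _
    rcases hcat : pvCatOf pvTable (PySem.Str.lower m) with _ | c
    · simp [pvCategory, hcat, hOther.symm]
    · simp [pvCategory, hcat]
  · -- Other bucket
    simp only [List.map_cons, List.map_nil]
    congr 2
    rw [List.filter_map, List.map_map]
    simp only [Function.comp_def, List.map_id']
    apply List.filter_congr
    intro m _
    rcases hcat : pvCatOf pvTable (PySem.Str.lower m) with _ | c
    · simp [pvCategory, hcat]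
    · have : c ≠ "Other" := by
        have hm := pvCatOf_mem pvTable (PySem.Str.lower m) c hcat
        have hn : "Other" ∉ pvTable.map Prod.fst := by decide
        exact fun e => hn (e ▸ hm)
      simp [pvCategory, hcat, this]

-- ===== VERDICT (by name: the statement is the Claim_ definition above) =====
theorem categorize_metrics_spec : Claim_equal_categorize_metrics := by
  intro md _
  show categorize_metrics md = categorize_metrics_alt md
  rw [pvA_char, pvB_char]
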